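-- pv_equiv track=rewrite | github.com/tomasvanagas/prime-research | experiments/algebraic/padic_interpolation.py | mahler_coefficients
-- ===== SOURCE A (Python) =====
-- def mahler_coefficients(values):
--     """
--     Given f(1), f(2), ..., f(N), compute Mahler coefficients c_0, ..., c_{N-1}.
--     c_k = Delta^k f(1) = sum_{j=0}^{k} (-1)^{k-j} C(k,j) f(j+1)
--
--     We use the standard forward difference algorithm (O(N^2) but fine for N~200).
--     """
--     N = len(values)
--     # Work with a copy; iteratively compute forward differences
--     # Delta^0 f = f, Delta^k f(1) = Delta^{k-1} f(2) - Delta^{k-1} f(1)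
--     diffs = list(values)  # diffs[j] = Delta^0 f(j+1)
--     coeffs = [diffs[0]]   # c_0 = f(1)
--     for k in range(1, N):
--         new_diffs = []
--         for j in range(len(diffs) - 1):
--             new_diffs.append(diffs[j + 1] - diffs[j])
--         diffs = new_diffs
--         coeffs.append(diffs[0])  # c_k = Delta^k f(1)
--     return coeffs
-- ===== SOURCE B (Python) =====
-- def _next_row(row):
--     # next Pascal-triangle row: convolve with (1, 1)
--     new = []
--     prev = row[0]
--     new.append(prev)
--     for x in row[1:]:
--         new.append(prev + x)
--         prev = x
--     new.append(prev)
--     return new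
--
--
-- def mahler_coefficients(values):
--     """c_k = sum_{j=0}^{k} (-1)^(k-j) C(k,j) f(j+1), computed directly
--     from the original values with a running Pascal row."""
--     coeffs = []
--     row = [1]
--     for k in range(len(values)):
--         sign = -1 if k % 2 else 1
--         s = 0
--         for b, v in zip(row, values):
--             s += sign * b * v
--             sign = -sign
--         coeffs.append(s)
--         row = _next_row(row)
--     return coeffs
-- ===== Notes on version B (the rewrite author's own statement) =====
-- stated objective: alternative
-- what changed: Instead of iterating a shrinking forward-difference table and reading off its first entry, B computes each Mahler coefficient directly as the signed binomial-weighted sum of the original values, maintaining a running Pascal-triangle row.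
import Mathlib
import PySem

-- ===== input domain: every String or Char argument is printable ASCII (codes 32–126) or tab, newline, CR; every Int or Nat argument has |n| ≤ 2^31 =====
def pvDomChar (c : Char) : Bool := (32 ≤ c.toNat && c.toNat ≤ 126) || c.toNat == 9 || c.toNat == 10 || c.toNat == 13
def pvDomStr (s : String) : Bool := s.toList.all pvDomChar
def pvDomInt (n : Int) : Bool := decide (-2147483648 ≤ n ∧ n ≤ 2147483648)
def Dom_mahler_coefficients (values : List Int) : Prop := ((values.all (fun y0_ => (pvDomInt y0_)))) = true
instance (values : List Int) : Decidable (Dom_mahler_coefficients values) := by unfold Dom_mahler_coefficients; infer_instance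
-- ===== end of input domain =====

-- B replaces A's shrinking forward-difference table by a direct signed binomial-weighted
-- sum of the original values with a running Pascal row (alternative decomposition, same O(N^2)).

-- ===== PORT A =====
-- inner loop: for j in range(len(diffs)-1): new_diffs.append(diffs[j+1] - diffs[j])
def stepA : List Int → List Int
  | a :: b :: t => (b - a) :: stepA (b :: t)
  | _ => []

def mahler_coefficients (values : List Int) : List Int :=
  -- diffs[0] is read as .headD 0: exact because Pre_ guarantees values ≠ [] (else IndexError)
  ((PySem.List.pyRange 1 (values.length : Int) 1).foldl
      (fun (st : List Int × List Int) _ =>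
        let d := stepA st.1
        (d, st.2 ++ [d.headD 0]))
      (values, [values.headD 0])).2

-- ===== PORT B =====
-- _next_row's loop over row[1:] with the running prev
def convTail (prev : Int) : List Int → List Int
  | [] => [prev]
  | x :: t => (prev + x) :: convTail x t

def nextRow : List Int → List Int
  | [] => []           -- unreachable in B (row is always nonempty)
  | p :: t => p :: convTail p t

-- inner loop: for b, v in zip(row, values): s += sign*b*v; sign = -sign
def signedDot (sign : Int) : List Int → List Int → Int
  | b :: bt, v :: vt => sign * b * v + signedDot (-sign) bt vt
  | _, _ => 0

def mahler_coefficients_alt (values : List Int) : List Int :=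
  ((PySem.List.pyRange 0 (values.length : Int) 1).foldl
      (fun (st : List Int × List Int) k =>
        let sign : Int := if PySem.Int.mod k 2 ≠ 0 then -1 else 1
        let s := signedDot sign st.2 values
        (st.1 ++ [s], nextRow st.2))
      ([], [1])).1

-- ===== PRECONDITION & SPEC =====
-- Pre_ excludes only the empty list, on which A raises IndexError at diffs[0]
def Pre_mahler_coefficients (values : List Int) : Prop := values ≠ []
instance (values : List Int) : Decidable (Pre_mahler_coefficients values) := by
  unfold Pre_mahler_coefficients; infer_instance

def pvWitness_mahler_coefficients : List Int := [1, 2, 4]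

def Spec_mahler_coefficients (values : List Int) (out : List Int) : Prop := out = mahler_coefficients_alt values
instance (values : List Int) (out : List Int) : Decidable (Spec_mahler_coefficients values out) := by unfold Spec_mahler_coefficients; infer_instance

-- ===== CLAIM (what is proved, stated in full; the proofs are below) =====
def Claim_equal_mahler_coefficients : Prop := ∀ (values : List Int), Dom_mahler_coefficients values → Pre_mahler_coefficients values → Spec_mahler_coefficients values (mahler_coefficients values)

-- ===== LEMMAS AND PROOFS =====

def stepIter (k : Nat) (l : List Int) : List Int := stepA^[k] l
def rowIter (k : Nat) : List Int := nextRow^[k] [1]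
def sg (k : Nat) : Int := if k % 2 = 0 then 1 else -1

lemma sg_succ (k : Nat) : sg (k + 1) = - sg k := by
  unfold sg
  rcases Nat.mod_two_eq_zero_or_one k with h | h <;> simp [Nat.add_mod, h]

lemma sign_cast (n : Nat) :
    (if PySem.Int.mod (n : Int) 2 ≠ 0 then (-1 : Int) else 1) = sg n := by
  rw [PySem.Int.mod_eq_emod_of_pos (by norm_num)]
  unfold sg
  split_ifs with h h' <;> omega

lemma length_stepA (a : Int) (t : List Int) : (stepA (a :: t)).length = t.length := by
  induction t generalizing a with
  | nil => simp [stepA]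
  | cons b t ih => simp [stepA, ih b]

lemma length_convTail (p : Int) (t : List Int) : (convTail p t).length = t.length + 1 := by
  induction t generalizing p with
  | nil => simp [convTail]
  | cons x t ih => simp [convTail, ih x]

lemma rowIter_shape (k : Nat) : rowIter k ≠ [] ∧ (rowIter k).length = k + 1 := by
  induction k with
  | zero => simp [rowIter]
  | succ k ih =>
    obtain ⟨hne, hlen⟩ := ih
    obtain ⟨p, t, h⟩ : ∃ p t, rowIter k = p :: t := by
      cases hr : rowIter k with
      | nil => exact absurd hr hne
      | cons p t => exact ⟨p, t, rfl⟩
    have hsucc : rowIter (k + 1) = p :: convTail p t := by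
      unfold rowIter at h ⊢
      rw [Function.iterate_succ_apply', h]
      rfl
    rw [h] at hlen
    constructor
    · simp [hsucc]
    · simp [hsucc, length_convTail]
      simp at hlen
      omega
    
lemma headD_eq_signedDot (l : List Int) : l.headD 0 = signedDot 1 [1] l := by
  cases l with
  | nil => simp [signedDot]
  | cons a t => simp [signedDot]

lemma signedDot_nil (sign : Int) (l : List Int) : signedDot sign [] l = 0 := by
  cases l <;> simp [signedDot]

-- one step of B's Pascal row matches one step of A's differences
lemma signedDot_step (bs : List Int) :
    ∀ (l : List Int) (sign : Int), bs.length + 1 ≤ l.length →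
      signedDot sign bs (stepA l) = signedDot (-sign) (nextRow bs) l := by
  induction bs with
  | nil =>
    intro l sign _
    simp [signedDot_nil, nextRow]
  | cons c ct ih =>
    intro l sign hlen
    obtain ⟨a, b, t, rfl⟩ : ∃ a b t, l = a :: b :: t := by
      cases l with
      | nil => simp at hlen
      | cons a l' =>
        cases l' with
        | nil => simp at hlen
        | cons b t => exact ⟨a, b, t, rfl⟩
    have hlen' : ct.length + 1 ≤ (b :: t).length := by simp at hlen ⊢; omega
    have hih := ih (b :: t) (-sign) hlen'
    show signedDot sign (c :: ct) ((b - a) :: stepA (b :: t)) = _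
    simp only [signedDot, hih, nextRow]
    cases ct with
    | nil => simp [convTail, signedDot]; ring
    | cons d dt =>
      simp only [convTail, signedDot, neg_neg]
      ring

lemma signedDot_iter (k : Nat) :
    ∀ (l : List Int), k + 1 ≤ l.length →
      signedDot 1 [1] (stepIter k l) = signedDot (sg k) (rowIter k) l := by
  induction k with
  | zero => intro l _; rfl
  | succ k ih =>
    intro l hlen
    obtain ⟨a, t, rfl⟩ : ∃ a t, l = a :: t := by
      cases l with
      | nil => simp at hlen
      | cons a t => exact ⟨a, t, rfl⟩
    have hstep : (stepA (a :: t)).length = t.length := length_stepA a t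
    have h1 : k + 1 ≤ (stepA (a :: t)).length := by simp at hlen; omega
    have h2 : (rowIter k).length + 1 ≤ (a :: t).length := by
      have := (rowIter_shape k).2
      simp at hlen ⊢; omega
    calc signedDot 1 [1] (stepIter (k + 1) (a :: t))
        = signedDot 1 [1] (stepIter k (stepA (a :: t))) := by
          unfold stepIter; rw [Function.iterate_succ_apply]
      _ = signedDot (sg k) (rowIter k) (stepA (a :: t)) := ih _ h1
      _ = signedDot (-(sg k)) (nextRow (rowIter k)) (a :: t) := signedDot_step _ _ _ h2
      _ = signedDot (sg (k + 1)) (rowIter (k + 1)) (a :: t) := by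
          rw [sg_succ]
          unfold rowIter
          rw [Function.iterate_succ_apply']

lemma A_char (values : List Int) (n : Nat) :
    (PySem.List.pyRange 1 ((n : Int) + 1) 1).foldl
      (fun (st : List Int × List Int) _ =>
        let d := stepA st.1
        (d, st.2 ++ [d.headD 0]))
      (values, [values.headD 0])
    = (stepIter n values,
       (List.range (n + 1)).map (fun k => (stepIter k values).headD 0)) := by
  induction n with
  | zero =>
    rw [show ((0 : Nat) : Int) + 1 = 1 by norm_num,
        PySem.List.pyRange_one_eq_nil le_rfl]
    simp [stepIter, List.range_succ]
  | succ n ih =>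
    have h : (1 : Int) ≤ (n : Int) + 1 := by omega
    rw [show ((n + 1 : Nat) : Int) + 1 = ((n : Int) + 1) + 1 by push_cast; ring,
        PySem.List.pyRange_one_succ_right h, List.foldl_append, ih]
    simp only [List.foldl_cons, List.foldl_nil, Prod.mk.injEq]
    refine ⟨?_, ?_⟩
    · unfold stepIter; rw [Function.iterate_succ_apply']
    · simp only [stepIter]
      rw [List.range_succ, List.map_append, List.range_succ, List.map_append]
      simp [Function.iterate_succ_apply', List.range_succ]

lemma B_char (values : List Int) (n : Nat) :
    (PySem.List.pyRange 0 (n : Int) 1).foldl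
      (fun (st : List Int × List Int) k =>
        let sign : Int := if PySem.Int.mod k 2 ≠ 0 then -1 else 1
        let s := signedDot sign st.2 values
        (st.1 ++ [s], nextRow st.2))
      ([], [1])
    = ((List.range n).map (fun k => signedDot (sg k) (rowIter k) values), rowIter n) := by
  induction n with
  | zero => simp [rowIter, PySem.List.pyRange_one_eq_nil]
  | succ n ih =>
    have h : (0 : Int) ≤ (n : Int) := by omega
    rw [show ((n + 1 : Nat) : Int) = (n : Int) + 1 by push_cast; ring,
        PySem.List.pyRange_one_succ_right h, List.foldl_append, ih]
    simp only [List.foldl_cons, List.foldl_nil, Prod.mk.injEq]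
    refine ⟨?_, ?_⟩
    · rw [List.range_succ, List.map_append, sign_cast]
      simp
    · unfold rowIter; rw [Function.iterate_succ_apply']

-- ===== VERDICT (by name: the statement is the Claim_ definition above) =====
theorem mahler_coefficients_spec : Claim_equal_mahler_coefficients := by
  intro values _ hpre
  obtain ⟨v, vt, rfl⟩ : ∃ v vt, values = v :: vt := by
    cases values with
    | nil => exact absurd rfl hpre
    | cons v vt => exact ⟨v, vt, rfl⟩
  unfold Spec_mahler_coefficients mahler_coefficients mahler_coefficients_alt
  rw [show ((v :: vt).length : Int) = ((vt.length : Nat) : Int) + 1 from by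
        push_cast [List.length_cons]; ring]
  rw [A_char (v :: vt) vt.length]
  rw [show ((vt.length : Nat) : Int) + 1 = (((vt.length + 1 : Nat)) : Int) by push_cast; ring]
  rw [B_char (v :: vt) (vt.length + 1)]
  simp only
  apply List.map_congr_left
  intro k hk
  have hk' : k + 1 ≤ (v :: vt).length := by
    simp at hk ⊢; omega
  rw [headD_eq_signedDot, signedDot_iter k _ hk']
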